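-- pv_equiv track=rewrite | github.com/Lee-412/KLTN_observability_for_microservice | SignozCore/scripts/evaluate_ab_sampling.py | _duration_bucket_counts
-- ===== SOURCE A (Python) =====
-- from typing import Any, Dict, Iterable, List, Optional, Set
--
-- def _duration_bucket_counts(values: List[int]) -> Dict[str, int]:
--     counts = {
--         "<10ms": 0,
--         "10-100ms": 0,
--         "100-500ms": 0,
--         ">=500ms": 0,
--     }
--     for ms in values:
--         if ms < 10:
--             counts["<10ms"] += 1
--         elif ms < 100:
--             counts["10-100ms"] += 1
--         elif ms < 500:
--             counts["100-500ms"] += 1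
--         else:
--             counts[">=500ms"] += 1
--     return counts
-- ===== SOURCE B (Python) =====
-- from typing import Dict, List
--
-- def _duration_bucket_counts(values: List[int]) -> Dict[str, int]:
--     # Cumulative-threshold counting: three independent "how many are below t"
--     # passes, then the buckets are consecutive differences of the cumulative
--     # counts. No per-element bucket dispatch.
--     lt10 = sum(1 for ms in values if ms < 10)
--     lt100 = sum(1 for ms in values if ms < 100)
--     lt500 = sum(1 for ms in values if ms < 500)
--     return {
--         "<10ms": lt10,
--         "10-100ms": lt100 - lt10,
--         "100-500ms": lt500 - lt100,
--         ">=500ms": len(values) - lt500,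
--     }
-- ===== Notes on version B (the rewrite author's own statement) =====
-- stated objective: alternative
-- what changed: Replaced per-element bucket dispatch (if-elif ladder updating a dict) by three independent cumulative threshold counts (how many values are below 10/100/500) whose consecutive differences are the bucket sizes, assembled into a dict literal.
import Mathlib
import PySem

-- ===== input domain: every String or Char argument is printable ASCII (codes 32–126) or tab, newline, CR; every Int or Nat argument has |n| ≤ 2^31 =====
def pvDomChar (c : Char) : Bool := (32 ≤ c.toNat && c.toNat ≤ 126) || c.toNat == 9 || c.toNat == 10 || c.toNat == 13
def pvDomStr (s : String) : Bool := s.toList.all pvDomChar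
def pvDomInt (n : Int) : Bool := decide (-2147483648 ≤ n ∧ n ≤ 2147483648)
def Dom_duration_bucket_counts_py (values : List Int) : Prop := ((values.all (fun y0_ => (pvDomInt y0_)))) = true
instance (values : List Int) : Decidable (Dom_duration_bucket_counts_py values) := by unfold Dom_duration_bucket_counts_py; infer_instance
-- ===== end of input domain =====

-- B replaces A's per-element if-elif dispatch by three cumulative threshold counts whose differences are the buckets (alternative decomposition; same cost).


-- ===== PORT A =====
def duration_bucket_counts_py (values : List Int) : List (String × Int) :=
  let counts : PySem.Dict String Int :=
    PySem.Dict.ofList [("<10ms", 0), ("10-100ms", 0), ("100-500ms", 0), (">=500ms", 0)]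
  let counts := values.foldl (fun counts ms =>
    if ms < 10 then counts.modify "<10ms" 0 (· + 1)
    else if ms < 100 then counts.modify "10-100ms" 0 (· + 1)
    else if ms < 500 then counts.modify "100-500ms" 0 (· + 1)
    else counts.modify ">=500ms" 0 (· + 1)) counts
  counts.items

-- ===== PORT B =====
-- sum(1 for ms in values if ms < t) is a fold adding 1 when the guard holds
def pvCountBelow (t : Int) (values : List Int) : Int :=
  values.foldl (fun acc ms => if ms < t then acc + 1 else acc) 0

def duration_bucket_counts_py_alt (values : List Int) : List (String × Int) :=
  let lt10 := pvCountBelow 10 values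
  let lt100 := pvCountBelow 100 values
  let lt500 := pvCountBelow 500 values
  [("<10ms", lt10), ("10-100ms", lt100 - lt10),
   ("100-500ms", lt500 - lt100), (">=500ms", (values.length : Int) - lt500)]

-- ===== PRECONDITION & SPEC =====
def Spec_duration_bucket_counts_py (values : List Int) (out : List (String × Int)) : Prop := out = duration_bucket_counts_py_alt values
instance (values : List Int) (out : List (String × Int)) : Decidable (Spec_duration_bucket_counts_py values out) := by unfold Spec_duration_bucket_counts_py; infer_instance

-- ===== CLAIM (what is proved, stated in full; the proofs are below) =====
def Claim_equal_duration_bucket_counts_py : Prop := ∀ (values : List Int), Dom_duration_bucket_counts_py values → Spec_duration_bucket_counts_py values (duration_bucket_counts_py values)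

-- ===== LEMMAS AND PROOFS =====
theorem pvCountBelow_eq (t : Int) (vs : List Int) :
    pvCountBelow t vs = ((vs.countP (fun x => decide (x < t)) : Nat) : Int) := by
  unfold pvCountBelow
  rw [show (fun (acc ms : Int) => if ms < t then acc + 1 else acc)
        = (fun (acc ms : Int) => if (fun x => decide (x < t)) ms = true then acc + 1 else acc) by
      funext acc ms; simp]
  rw [PySem.List.foldl_count_if]
  simp

theorem pvModify1 (a b c d : Int) :
    ((PySem.Dict.mk [("<10ms", a), ("10-100ms", b), ("100-500ms", c), (">=500ms", d)]).modify "<10ms" 0 (· + 1))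
    = PySem.Dict.mk [("<10ms", a + 1), ("10-100ms", b), ("100-500ms", c), (">=500ms", d)] := by
  simp [PySem.Dict.modify, PySem.Dict.getD, PySem.Dict.get?, PySem.Dict.insert]

theorem pvModify2 (a b c d : Int) :
    ((PySem.Dict.mk [("<10ms", a), ("10-100ms", b), ("100-500ms", c), (">=500ms", d)]).modify "10-100ms" 0 (· + 1))
    = PySem.Dict.mk [("<10ms", a), ("10-100ms", b + 1), ("100-500ms", c), (">=500ms", d)] := by
  simp [PySem.Dict.modify, PySem.Dict.getD, PySem.Dict.get?, PySem.Dict.insert]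

theorem pvModify3 (a b c d : Int) :
    ((PySem.Dict.mk [("<10ms", a), ("10-100ms", b), ("100-500ms", c), (">=500ms", d)]).modify "100-500ms" 0 (· + 1))
    = PySem.Dict.mk [("<10ms", a), ("10-100ms", b), ("100-500ms", c + 1), (">=500ms", d)] := by
  simp [PySem.Dict.modify, PySem.Dict.getD, PySem.Dict.get?, PySem.Dict.insert]

theorem pvModify4 (a b c d : Int) :
    ((PySem.Dict.mk [("<10ms", a), ("10-100ms", b), ("100-500ms", c), (">=500ms", d)]).modify ">=500ms" 0 (· + 1))
    = PySem.Dict.mk [("<10ms", a), ("10-100ms", b), ("100-500ms", c), (">=500ms", d + 1)] := by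
  simp [PySem.Dict.modify, PySem.Dict.getD, PySem.Dict.get?, PySem.Dict.insert]

theorem pvFold_items (vs : List Int) : ∀ (a b c d : Int),
    (vs.foldl (fun counts ms =>
        if ms < 10 then counts.modify "<10ms" 0 (· + 1)
        else if ms < 100 then counts.modify "10-100ms" 0 (· + 1)
        else if ms < 500 then counts.modify "100-500ms" 0 (· + 1)
        else counts.modify ">=500ms" 0 (· + 1))
      (PySem.Dict.mk [("<10ms", a), ("10-100ms", b), ("100-500ms", c), (">=500ms", d)])).items
    = [("<10ms", a + pvCountBelow 10 vs),
       ("10-100ms", b + (pvCountBelow 100 vs - pvCountBelow 10 vs)),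
       ("100-500ms", c + (pvCountBelow 500 vs - pvCountBelow 100 vs)),
       (">=500ms", d + ((vs.length : Int) - pvCountBelow 500 vs))] := by
  induction vs with
  | nil => intro a b c d; simp [pvCountBelow]
  | cons m vs ih =>
    intro a b c d
    simp only [List.foldl_cons]
    split_ifs with h1 h2 h3
    · rw [pvModify1, ih]
      simp [pvCountBelow_eq, h1, show m < 100 by omega, show m < 500 by omega]
      omega
    · rw [pvModify2, ih]
      simp [pvCountBelow_eq, h1, h2, show m < 500 by omega]
      omega
    · rw [pvModify3, ih]
      simp [pvCountBelow_eq, h1, h2, h3]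
      omega
    · rw [pvModify4, ih]
      simp [pvCountBelow_eq, h1, h2, h3]
      omega

-- ===== VERDICT (by name: the statement is the Claim_ definition above) =====
theorem duration_bucket_counts_py_spec : Claim_equal_duration_bucket_counts_py := by
  intro values _
  unfold Spec_duration_bucket_counts_py duration_bucket_counts_py duration_bucket_counts_py_alt
  have h0 : (PySem.Dict.ofList [("<10ms", (0:Int)), ("10-100ms", 0), ("100-500ms", 0), (">=500ms", 0)])
      = PySem.Dict.mk [("<10ms", 0), ("10-100ms", 0), ("100-500ms", 0), (">=500ms", 0)] := by decide
  rw [h0, pvFold_items]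
  simp
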